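-- pv_equiv track=rewrite | github.com/harshitasingh1612/Weekly_data_analysis | src/data_processing.py | get_next_decomposition_combination
-- ===== SOURCE A (Python) =====
-- def get_next_decomposition_combination(possibilitiesLists: list, position: int)-> list:
--     """Generate a specific combination dynamically based on a given position
--
--     Args:
--         possibilitiesLists: A list of possibilities
--         position: represents the index of the desired combination.
--
--     Returns:
--         a combination at a specified position
--     """
--     lists = reversed(possibilitiesLists)
--     combination = []
--     for lst in lists:
--         index = position % len(lst)
--         combination.insert(0, lst[index])
--         position //= len(lst)
--
--     return combination
-- ===== SOURCE B (Python) =====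
-- def get_next_decomposition_combination(possibilitiesLists: list, position: int) -> list:
--     """Decode position via precomputed place-value weights in one forward pass."""
--     weights = []
--     w = 1
--     for lst in reversed(possibilitiesLists):
--         weights.append(w)
--         w *= len(lst)
--     weights.reverse()
--     return [lst[(position // w) % len(lst)] for lst, w in zip(possibilitiesLists, weights)]
-- ===== Notes on version B (the rewrite author's own statement) =====
-- stated objective: alternative
-- what changed: B precomputes a place-value weights table (suffix products of sublist lengths) and emits each digit in one forward pass via (position // weight) % len, instead of A's reverse loop that repeatedly divides position and inserts at the front.
import Mathlib
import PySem

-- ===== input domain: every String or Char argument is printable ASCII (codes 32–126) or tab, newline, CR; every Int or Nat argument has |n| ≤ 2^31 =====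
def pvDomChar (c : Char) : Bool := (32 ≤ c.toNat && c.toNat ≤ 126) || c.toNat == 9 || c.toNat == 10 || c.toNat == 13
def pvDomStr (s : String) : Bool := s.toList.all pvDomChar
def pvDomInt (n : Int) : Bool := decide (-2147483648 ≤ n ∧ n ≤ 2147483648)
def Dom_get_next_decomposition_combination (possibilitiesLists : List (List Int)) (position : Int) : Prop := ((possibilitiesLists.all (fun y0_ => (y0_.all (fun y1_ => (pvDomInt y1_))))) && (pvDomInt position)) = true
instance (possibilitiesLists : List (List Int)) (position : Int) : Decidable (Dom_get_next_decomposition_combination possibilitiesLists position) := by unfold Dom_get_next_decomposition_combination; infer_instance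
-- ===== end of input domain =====

-- B replaces A's reverse loop (repeated division + insert at front) by a precomputed
-- place-value weights table and one forward pass; equivalence is about the return value.

-- ===== PORT A =====
-- literal port of A: iterate over reversed(possibilitiesLists); combination.insert(0, x) is cons
def get_next_decomposition_combination (possibilitiesLists : List (List Int)) (position : Int) : List Int :=
  (possibilitiesLists.reverse.foldl
    (fun (st : List Int × Int) lst =>
      (PySem.List.pyGetD lst (PySem.Int.mod st.2 (lst.length : Int)) 0 :: st.1,
       PySem.Int.floordiv st.2 (lst.length : Int)))
    ([], position)).1

-- ===== PORT B =====
-- weights: for each sublist in original order, the product of the lengths of all later sublists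
def pvWeights (possibilitiesLists : List (List Int)) : List Int :=
  ((possibilitiesLists.reverse.foldl
      (fun (st : List Int × Int) lst => (st.1 ++ [st.2], st.2 * (lst.length : Int)))
      ([], 1)).1).reverse

def get_next_decomposition_combination_alt (possibilitiesLists : List (List Int)) (position : Int) : List Int :=
  (possibilitiesLists.zip (pvWeights possibilitiesLists)).map
    (fun p => PySem.List.pyGetD p.1
        (PySem.Int.mod (PySem.Int.floordiv position p.2) (p.1.length : Int)) 0)

-- ===== PRECONDITION & SPEC =====
-- Pre_ excludes exactly the inputs where the Python A raises (ZeroDivisionError on an empty sublist).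
def Pre_get_next_decomposition_combination (possibilitiesLists : List (List Int)) (position : Int) : Prop :=
  ∀ lst ∈ possibilitiesLists, lst ≠ []
instance (possibilitiesLists : List (List Int)) (position : Int) : Decidable (Pre_get_next_decomposition_combination possibilitiesLists position) := by unfold Pre_get_next_decomposition_combination; infer_instance
def pvWitness_get_next_decomposition_combination : List (List Int) × Int := ([[1, 2], [3, 4, 5]], 4)

def Spec_get_next_decomposition_combination (possibilitiesLists : List (List Int)) (position : Int) (out : List Int) : Prop := out = get_next_decomposition_combination_alt possibilitiesLists position
instance (possibilitiesLists : List (List Int)) (position : Int) (out : List Int) : Decidable (Spec_get_next_decomposition_combination possibilitiesLists position out) := by unfold Spec_get_next_decomposition_combination; infer_instance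

-- ===== CLAIM (what is proved, stated in full; the proofs are below) =====
def Claim_equal_get_next_decomposition_combination : Prop := ∀ (possibilitiesLists : List (List Int)) (position : Int), Dom_get_next_decomposition_combination possibilitiesLists position → Pre_get_next_decomposition_combination possibilitiesLists position → Spec_get_next_decomposition_combination possibilitiesLists position (get_next_decomposition_combination possibilitiesLists position)

-- ===== LEMMAS AND PROOFS =====

-- A's fold appends its accumulator at the tail of the produced combination
theorem pvA_foldl_acc (ys : List (List Int)) (c : List Int) (p : Int) :
    (ys.foldl
      (fun (st : List Int × Int) lst =>
        (PySem.List.pyGetD lst (PySem.Int.mod st.2 (lst.length : Int)) 0 :: st.1,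
         PySem.Int.floordiv st.2 (lst.length : Int)))
      (c, p)).1
    = (ys.foldl
      (fun (st : List Int × Int) lst =>
        (PySem.List.pyGetD lst (PySem.Int.mod st.2 (lst.length : Int)) 0 :: st.1,
         PySem.Int.floordiv st.2 (lst.length : Int)))
      ([], p)).1 ++ c := by
  induction ys generalizing c p with
  | nil => simp
  | cons l ys ih =>
    simp only [List.foldl_cons]
    rw [ih, ih ([PySem.List.pyGetD l (PySem.Int.mod p (l.length : Int)) 0])]
    simp

-- A on xs ++ [l]
theorem pvA_snoc (xs : List (List Int)) (l : List Int) (p : Int) :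
    get_next_decomposition_combination (xs ++ [l]) p
    = get_next_decomposition_combination xs (PySem.Int.floordiv p (l.length : Int))
      ++ [PySem.List.pyGetD l (PySem.Int.mod p (l.length : Int)) 0] := by
  unfold get_next_decomposition_combination
  rw [List.reverse_append]
  simp only [List.reverse_singleton, List.singleton_append, List.foldl_cons]
  rw [pvA_foldl_acc]

-- the weights fold, with a general accumulator
theorem pvW_foldl_acc (ys : List (List Int)) (c : List Int) (w : Int) :
    ys.foldl
      (fun (st : List Int × Int) lst => (st.1 ++ [st.2], st.2 * (lst.length : Int)))
      (c, w)
    = (c ++ ((ys.foldl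
        (fun (st : List Int × Int) lst => (st.1 ++ [st.2], st.2 * (lst.length : Int)))
        ([], 1)).1).map (fun t => w * t),
       w * (ys.foldl
        (fun (st : List Int × Int) lst => (st.1 ++ [st.2], st.2 * (lst.length : Int)))
        ([], 1)).2) := by
  induction ys generalizing c w with
  | nil => simp
  | cons l ys ih =>
    simp only [List.foldl_cons, List.nil_append, one_mul]
    rw [ih (c ++ [w]) (w * (l.length : Int)), ih [1] ((l.length : Int))]
    simp [List.map_map, mul_assoc]

theorem pvWeights_snoc (xs : List (List Int)) (l : List Int) :
    pvWeights (xs ++ [l])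
    = (pvWeights xs).map (fun t => (l.length : Int) * t) ++ [1] := by
  unfold pvWeights
  rw [List.reverse_append]
  simp only [List.reverse_singleton, List.singleton_append, List.foldl_cons, List.nil_append]
  rw [pvW_foldl_acc]
  simp [List.map_reverse]

theorem pvWeights_length (xs : List (List Int)) :
    (pvWeights xs).length = xs.length := by
  induction xs using List.reverseRecOn with
  | nil => simp [pvWeights]
  | append_singleton xs l ih => rw [pvWeights_snoc]; simp [ih]

theorem pvWeights_pos (xs : List (List Int)) (h : ∀ lst ∈ xs, lst ≠ []) :
    ∀ w ∈ pvWeights xs, 0 < w := by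
  induction xs using List.reverseRecOn with
  | nil => simp [pvWeights]
  | append_singleton xs l ih =>
    rw [pvWeights_snoc]
    intro w hw
    rcases List.mem_append.1 hw with hw | hw
    · rcases List.mem_map.1 hw with ⟨t, ht, rfl⟩
      have hl : l ≠ [] := h l (by simp)
      have hlen : 0 < (l.length : Int) := by
        have := List.length_pos_iff.2 hl
        exact_mod_cast this
      have ht' : 0 < t := ih (fun lst hlst => h lst (by simp [hlst])) t ht
      positivity
    · simp at hw; omega

-- B on xs ++ [l], when every sublist is nonempty
theorem pvB_snoc (xs : List (List Int)) (l : List Int) (p : Int)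
    (h : ∀ lst ∈ xs, lst ≠ []) (hl : l ≠ []) :
    get_next_decomposition_combination_alt (xs ++ [l]) p
    = get_next_decomposition_combination_alt xs (PySem.Int.floordiv p (l.length : Int))
      ++ [PySem.List.pyGetD l (PySem.Int.mod p (l.length : Int)) 0] := by
  have hn : 0 < (l.length : Int) := by
    have := List.length_pos_iff.2 hl
    exact_mod_cast this
  unfold get_next_decomposition_combination_alt
  rw [pvWeights_snoc]
  rw [List.zip_append (by simp [pvWeights_length])]
  rw [List.map_append]
  congr 1
  · rw [List.zip_map_right, List.map_map]
    apply List.map_congr_left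
    intro a ha
    have hw : 0 < a.2 := pvWeights_pos xs h a.2 (List.of_mem_zip ha).2
    simp only [Function.comp, Prod.map]
    congr 2
    rw [PySem.Int.floordiv_eq_ediv_of_pos (by positivity),
        PySem.Int.floordiv_eq_ediv_of_pos hn,
        PySem.Int.floordiv_eq_ediv_of_pos hw]
    rw [← Int.ediv_ediv_of_nonneg (le_of_lt hn)]
  · simp

-- ===== VERDICT (by name: the statement is the Claim_ definition above) =====
theorem pvMain (pls : List (List Int)) (pos : Int) (hpre : ∀ lst ∈ pls, lst ≠ []) :
    get_next_decomposition_combination pls pos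
    = get_next_decomposition_combination_alt pls pos := by
  induction pls using List.reverseRecOn generalizing pos with
  | nil => rfl
  | append_singleton xs l ih =>
    have hxs : ∀ lst ∈ xs, lst ≠ [] := fun lst h => hpre lst (by simp [h])
    have hl : l ≠ [] := hpre l (by simp)
    rw [pvA_snoc, pvB_snoc xs l pos hxs hl, ih _ hxs]

theorem get_next_decomposition_combination_spec : Claim_equal_get_next_decomposition_combination :=
  fun pls pos _ hpre => pvMain pls pos hpre
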